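-- pv_equiv track=rewrite | github.com/dbswl4951/programmers | programmers_level3/숫자 게임.py | solution
-- ===== SOURCE A (Python) =====
-- def solution(A, B):
--     result,idx=0,0
--     A.sort()
--     B.sort()
--     for a in A:
--         for i in range(idx,len(B)):
--             idx += 1
--             if a<B[i]:
--                 result+=1
--                 break
--     return result
-- ===== SOURCE B (Python) =====
-- def solution(A, B):
--     # Descending greedy: repeatedly compare the largest remaining cards.
--     A.sort()
--     B.sort()
--     a = A[:]
--     b = B[:]
--     wins = 0
--     while a and b:
--         if a[-1] < b[-1]:
--             wins += 1
--             b.pop()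
--         a.pop()
--     return wins
-- ===== Notes on version B (the rewrite author's own statement) =====
-- stated objective: alternative
-- what changed: Replaces A's forward two-pointer scan (per a, advance an index over B until a beating card is found) with a descending greedy that compares the largest remaining cards from the top and discards an unbeatable A maximum, maintaining two shrinking ends.
import Mathlib
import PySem

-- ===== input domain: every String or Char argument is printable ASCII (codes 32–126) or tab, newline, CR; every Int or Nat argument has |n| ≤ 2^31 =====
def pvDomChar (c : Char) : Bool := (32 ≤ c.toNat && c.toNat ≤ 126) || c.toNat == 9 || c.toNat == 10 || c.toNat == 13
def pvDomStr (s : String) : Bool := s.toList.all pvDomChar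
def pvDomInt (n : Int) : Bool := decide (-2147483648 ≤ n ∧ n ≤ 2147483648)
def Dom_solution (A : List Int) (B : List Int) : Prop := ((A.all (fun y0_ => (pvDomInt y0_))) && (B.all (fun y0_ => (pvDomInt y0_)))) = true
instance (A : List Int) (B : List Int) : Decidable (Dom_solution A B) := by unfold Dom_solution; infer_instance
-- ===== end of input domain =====

-- B replaces A's forward index scan by a descending greedy over the two list ends (alternative
-- decomposition, same cost). Both Pythons sort the argument lists in place; the equivalence proved
-- here is about the RETURN value only (the observable mutation — both lists sorted — is identical).

-- ===== PORT A =====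
-- inner 'for i in range(idx, len(B)): idx += 1; if a < B[i]: result += 1; break'
def pvInnerA (sB : List Int) (a : Int) : List Int → Int × Int → Int × Int
  | [], st => st
  | i :: is, (result, idx) =>
      let idx := idx + 1
      match PySem.List.pyGet? sB i with
      | some b => if a < b then (result + 1, idx) else pvInnerA sB a is (result, idx)
      | none => (result, idx)  -- unreachable: range(idx, len(B)) indices are always in range

def solution (A : List Int) (B : List Int) : Int :=
  let sA := PySem.List.sorted A (fun x => x) false
  let sB := PySem.List.sorted B (fun x => x) false
  (sA.foldl (fun st a => pvInnerA sB a (PySem.List.pyRange st.2 (sB.length : Int) 1) st)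
    ((0 : Int), (0 : Int))).1

-- ===== PORT B =====
-- 'while a and b: if a[-1] < b[-1]: wins += 1; b.pop(); a.pop()' — pops from the end of the
-- ascending copies = head recursion over the reversed lists
def pvDescLoop : List Int → List Int → Int → Int
  | a :: as, b :: bs, wins =>
      if a < b then pvDescLoop as bs (wins + 1) else pvDescLoop as (b :: bs) wins
  | _, _, wins => wins

def solution_alt (A : List Int) (B : List Int) : Int :=
  let sA := PySem.List.sorted A (fun x => x) false
  let sB := PySem.List.sorted B (fun x => x) false
  pvDescLoop sA.reverse sB.reverse 0

-- ===== PRECONDITION & SPEC =====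
def Spec_solution (A : List Int) (B : List Int) (out : Int) : Prop := out = solution_alt A B
instance (A : List Int) (B : List Int) (out : Int) : Decidable (Spec_solution A B out) := by unfold Spec_solution; infer_instance

-- ===== CLAIM (what is proved, stated in full; the proofs are below) =====
def Claim_equal_solution : Prop := ∀ (A : List Int) (B : List Int), Dom_solution A B → Spec_solution A B (solution A B)

-- ===== LEMMAS AND PROOFS =====

-- functional description of A's forward greedy on the sorted lists
def pvF : List Int → List Int → Int
  | [], _ => 0
  | a :: as, bs =>
      match bs.dropWhile (fun b => decide (b ≤ a)) with
      | [] => 0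
      | _ :: rest => 1 + pvF as rest

-- functional description of B's descending greedy (lists given in descending order)
def pvD : List Int → List Int → Int
  | a :: as, b :: bs => if a < b then 1 + pvD as bs else pvD as (b :: bs)
  | _, _ => 0

lemma pvDescLoop_eq_pvD : ∀ (as bs : List Int) (w : Int), pvDescLoop as bs w = w + pvD as bs := by
  intro as
  induction as with
  | nil => intro bs w; cases bs <;> simp [pvDescLoop, pvD]
  | cons a as ih =>
      intro bs w
      cases bs with
      | nil => simp [pvDescLoop, pvD]
      | cons b bs =>
          by_cases h : a < b
          · simp [pvDescLoop, pvD, h, ih]; ring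
          · simp [pvDescLoop, pvD, h, ih]

lemma pvF_nil_right : ∀ as : List Int, pvF as [] = 0 := by
  intro as; cases as <;> simp [pvF]

lemma suffix_drop_eq {s l : List Int} (h : s <:+ l) :
    l.drop (l.length - s.length) = s := by
  obtain ⟨t, rfl⟩ := h
  have hl : (t ++ s).length - s.length = t.length := by simp
  rw [hl, List.drop_left]

lemma pvInnerA_spec (sB : List Int) (a : Int) :
    ∀ (n idx : Nat) (result : Int), sB.length ≤ idx + n → idx ≤ sB.length →
      pvInnerA sB a (PySem.List.pyRange (idx : Int) (sB.length : Int) 1) (result, (idx : Int)) =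
        match (sB.drop idx).dropWhile (fun b => decide (b ≤ a)) with
        | [] => (result, (sB.length : Int))
        | _ :: rest => (result + 1, ((sB.length - rest.length : Nat) : Int)) := by
  intro n
  induction n with
  | zero =>
      intro idx result h1 h2
      have hidx : idx = sB.length := by omega
      subst hidx
      rw [PySem.List.pyRange_one_eq_nil (by omega)]
      simp [pvInnerA]
  | succ n ih =>
      intro idx result h1 h2
      rcases Nat.lt_or_ge idx sB.length with hlt | hge
      · rw [PySem.List.pyRange_one_cons (by exact_mod_cast hlt)]
        have hget : PySem.List.pyGet? sB (idx : Int) = some sB[idx] := by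
          rw [PySem.List.pyGet?_natCast]
          simp [List.getElem?_eq_getElem hlt]
        have hdrop : sB.drop idx = sB[idx] :: sB.drop (idx + 1) :=
          List.drop_eq_getElem_cons hlt
        by_cases hab : a < sB[idx]
        · simp only [pvInnerA, hget]
          rw [if_pos hab, hdrop]
          have hpred : (fun b => decide (b ≤ a)) sB[idx] = false := by
            simp [not_le.mpr hab]
          rw [List.dropWhile_cons_of_neg (by simp [hpred])]
          have hlen : (sB.drop (idx + 1)).length = sB.length - (idx + 1) := by
            simp
          simp only [hlen]
          have : sB.length - (sB.length - (idx + 1)) = idx + 1 := by omega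
          rw [this]
          push_cast
          ring_nf
        · simp only [pvInnerA, hget]
          rw [if_neg hab]
          have : ((idx : Int) + 1) = ((idx + 1 : Nat) : Int) := by push_cast; ring
          rw [this]
          rw [ih (idx + 1) result (by omega) (by omega)]
          rw [hdrop, List.dropWhile_cons_of_pos (by simp [not_lt.mp hab])]
      · have hidx : idx = sB.length := by omega
        subst hidx
        rw [PySem.List.pyRange_one_eq_nil (by omega)]
        simp [pvInnerA]

lemma pvFoldl_spec (sB : List Int) :
    ∀ (as : List Int) (result : Int) (idx : Nat), idx ≤ sB.length →
      ((as.foldl (fun st a => pvInnerA sB a (PySem.List.pyRange st.2 (sB.length : Int) 1) st)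
          (result, (idx : Int))).1 = result + pvF as (sB.drop idx)) := by
  intro as
  induction as with
  | nil => intro result idx h; simp [pvF]
  | cons a as ih =>
      intro result idx h
      simp only [List.foldl_cons]
      rw [pvInnerA_spec sB a (sB.length - idx) idx result (by omega) h]
      cases hdw : (sB.drop idx).dropWhile (fun b => decide (b ≤ a)) with
      | nil =>
          rw [show ((sB.length : Nat) : Int) = ((sB.length : Nat) : Int) from rfl]
          rw [ih result sB.length (le_refl _)]
          simp [pvF, hdw, pvF_nil_right]
      | cons c rest =>
          have hsuf : rest <:+ sB := by
            have h1 : c :: rest <:+ sB.drop idx := hdw ▸ List.dropWhile_suffix _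
            have h2 : sB.drop idx <:+ sB := List.drop_suffix _ _
            exact (List.suffix_cons c rest).trans (h1.trans h2)
          have hlen : rest.length ≤ sB.length := hsuf.length_le
          rw [ih (result + 1) (sB.length - rest.length) (by omega)]
          rw [suffix_drop_eq hsuf]
          simp [pvF, hdw]
          ring

lemma pvD_nil_right : ∀ as : List Int, pvD as [] = 0 := by
  intro as; cases as <;> rfl

lemma pvF_drop_unbeatable : ∀ (as bs : List Int) (am : Int),
    (∀ b ∈ bs, b ≤ am) → pvF (as ++ [am]) bs = pvF as bs := by
  intro as
  induction as with
  | nil =>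
      intro bs am h
      have : bs.dropWhile (fun b => decide (b ≤ am)) = [] :=
        List.dropWhile_eq_nil_iff.mpr (by intro x hx; simp [h x hx])
      simp [pvF, this]
  | cons a as ih =>
      intro bs am h
      simp only [List.cons_append, pvF]
      cases hdw : bs.dropWhile (fun b => decide (b ≤ a)) with
      | nil => rfl
      | cons c rest =>
          have hsub : ∀ b ∈ rest, b ≤ am := by
            intro b hb
            apply h
            have h1 : c :: rest <:+ bs := hdw ▸ List.dropWhile_suffix _
            exact h1.subset (List.mem_cons_of_mem c hb)
          show (1 + pvF (as ++ [am]) rest : Int) = 1 + pvF as rest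
          rw [ih rest am hsub]

lemma pvF_pop_win : ∀ (as bs : List Int) (am bm : Int),
    (as ++ [am]).Pairwise (· ≤ ·) → (bs ++ [bm]).Pairwise (· ≤ ·) → am < bm →
    pvF (as ++ [am]) (bs ++ [bm]) = 1 + pvF as bs := by
  intro as
  induction as with
  | nil =>
      intro bs am bm _ _ hab
      cases hdw : (bs ++ [bm]).dropWhile (fun b => decide (b ≤ am)) with
      | nil =>
          exfalso
          have := List.dropWhile_eq_nil_iff.mp hdw bm (by simp)
          simp at this
          omega
      | cons c rest => simp [pvF, hdw]
  | cons a as ih =>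
      intro bs am bm hA hB hab
      rw [List.cons_append] at hA ⊢
      rcases List.pairwise_cons.mp hA with ⟨hfst, hApw⟩
      have haam : a ≤ am := hfst am (by simp)
      cases hdw : bs.dropWhile (fun b => decide (b ≤ a)) with
      | nil =>
          have hbm : ¬ (bm ≤ a) := by omega
          simp [pvF, List.dropWhile_append, hdw, hbm, pvF_nil_right]
      | cons c rest =>
          have hsufB : (c :: rest) <:+ bs := hdw ▸ List.dropWhile_suffix _
          have hBpw : (rest ++ [bm]).Pairwise (· ≤ ·) := by
            obtain ⟨t, ht⟩ := hsufB
            have hsuf2 : (rest ++ [bm]) <:+ bs ++ [bm] := ⟨t ++ [c], by rw [← ht]; simp⟩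
            exact hB.sublist hsuf2.sublist
          have hL : pvF (a :: (as ++ [am])) (bs ++ [bm])
              = 1 + pvF (as ++ [am]) (rest ++ [bm]) := by
            simp [pvF, List.dropWhile_append, hdw]
          have hR : pvF (a :: as) bs = 1 + pvF as rest := by
            simp [pvF, hdw]
          rw [hL, hR, ih rest am bm hApw hBpw hab]

lemma pvF_eq_pvD_rev : ∀ (N : Nat) (as bs : List Int), as.length + bs.length ≤ N →
    as.Pairwise (· ≤ ·) → bs.Pairwise (· ≤ ·) →
    pvF as bs = pvD as.reverse bs.reverse := by
  intro N
  induction N with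
  | zero =>
      intro as bs h _ _
      have : as = [] ∧ bs = [] := by
        constructor <;> (apply List.eq_nil_of_length_eq_zero; omega)
      rcases this with ⟨rfl, rfl⟩
      rfl
  | succ N ih =>
      intro as bs hlen hA hB
      rcases List.eq_nil_or_concat as with rfl | ⟨as₀, am, rfl⟩
      · simp [pvF]
        cases bs.reverse <;> rfl
      · rcases List.eq_nil_or_concat bs with rfl | ⟨bs₀, bm, rfl⟩
        · rw [pvF_nil_right]
          simp [pvD_nil_right]
        · simp only [List.concat_eq_append] at hA hB hlen ⊢
          have hA₀ : as₀.Pairwise (· ≤ ·) := hA.sublist (by simp)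
          have hB₀ : bs₀.Pairwise (· ≤ ·) := hB.sublist (by simp)
          have hrev : (as₀ ++ [am]).reverse = am :: as₀.reverse := by simp
          have hrevB : (bs₀ ++ [bm]).reverse = bm :: bs₀.reverse := by simp
          rw [hrev, hrevB]
          by_cases hab : am < bm
          · rw [pvF_pop_win as₀ bs₀ am bm hA hB hab]
            simp only [pvD, if_pos hab]
            rw [ih as₀ bs₀ (by simp at hlen ⊢; omega) hA₀ hB₀]
          · have hble : ∀ b ∈ bs₀ ++ [bm], b ≤ am := by
              intro b hb
              rcases List.mem_append.mp hb with hb | hb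
              · have : b ≤ bm := by
                  rcases (List.pairwise_append.mp hB) with ⟨_, _, hcross⟩
                  exact hcross b hb bm (by simp)
                omega
              · simp at hb; omega
            rw [pvF_drop_unbeatable as₀ (bs₀ ++ [bm]) am hble]
            simp only [pvD, if_neg hab]
            rw [ih as₀ (bs₀ ++ [bm]) (by simp at hlen ⊢; omega) hA₀ hB]
            rw [hrevB]

-- ===== VERDICT (by name: the statement is the Claim_ definition above) =====
theorem solution_spec : Claim_equal_solution := by
  intro A B _
  unfold Spec_solution solution solution_alt
  simp only []
  set sA := PySem.List.sorted A (fun x => x) false with hsA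
  set sB := PySem.List.sorted B (fun x => x) false with hsB
  have hpwA : sA.Pairwise (· ≤ ·) := by
    simpa using PySem.List.sorted_pairwise A (fun x => x)
  have hpwB : sB.Pairwise (· ≤ ·) := by
    simpa using PySem.List.sorted_pairwise B (fun x => x)
  have h1 : ((sA.foldl (fun st a => pvInnerA sB a (PySem.List.pyRange st.2 (sB.length : Int) 1) st)
      ((0 : Int), (0 : Int))).1 = 0 + pvF sA (sB.drop 0)) := by
    have := pvFoldl_spec sB sA 0 0 (by omega)
    simpa using this
  rw [h1, pvDescLoop_eq_pvD]
  simp only [List.drop_zero, zero_add]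
  exact pvF_eq_pvD_rev (sA.length + sB.length) sA sB (le_refl _) hpwA hpwB
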